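-- pv_equiv track=rewrite | github.com/Swiss-Polar-Institute/science-data-utils | ferrybox_bad_data_times_to_status.py | process_to_on_off
-- ===== SOURCE A (Python) =====
-- def process_to_on_off(l):
--     output_list = []
--
--     list_iter = iter(l)
--
--     first_row = next(list_iter)
--
--     previous_time_off_start = first_row[0]
--     previous_time_off_end = first_row[1]
--
--     count_midnight_rows_skipped = 0
--
--     output_list.append([previous_time_off_start, previous_time_off_end, 'off'])
--
--     for row in list_iter:
--         current_time_off_start = row[0]
--         current_time_off_end = row[1]
--
--         output_list.append([previous_time_off_end, current_time_off_start, 'on'])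
--         output_list.append([current_time_off_start, current_time_off_end, 'off'])
--
--         previous_time_off_end = current_time_off_end
--
--     return output_list
-- ===== SOURCE B (Python) =====
-- def process_to_on_off(l):
--     offs = [[r[0], r[1], 'off'] for r in l]
--     ons = [[a[1], b[0], 'on'] for a, b in zip(l, l[1:])]
--     result = [offs[0]]
--     for on_row, off_row in zip(ons, offs[1:]):
--         result.append(on_row)
--         result.append(off_row)
--     return result
-- ===== Notes on version B (the rewrite author's own statement) =====
-- stated objective: alternative
-- what changed: B builds the 'off' intervals and the 'on' gap intervals in two separate comprehension passes (the gaps via zip of the list with its own tail) and then interleaves the two lists, instead of A's single stateful loop threading previous_time_off_end.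
import Mathlib
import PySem

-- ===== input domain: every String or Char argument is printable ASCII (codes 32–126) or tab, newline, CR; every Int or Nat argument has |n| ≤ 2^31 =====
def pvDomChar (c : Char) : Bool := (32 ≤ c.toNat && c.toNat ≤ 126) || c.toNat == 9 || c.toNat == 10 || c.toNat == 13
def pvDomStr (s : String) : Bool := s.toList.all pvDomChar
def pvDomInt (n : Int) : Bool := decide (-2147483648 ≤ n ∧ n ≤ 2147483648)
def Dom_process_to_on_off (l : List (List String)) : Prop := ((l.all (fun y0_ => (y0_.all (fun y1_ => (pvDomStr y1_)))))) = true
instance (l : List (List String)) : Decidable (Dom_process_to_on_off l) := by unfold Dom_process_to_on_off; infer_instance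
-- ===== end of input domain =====

-- B computes the 'off' rows and the 'on' gap rows in two separate passes (the gaps via zip with the tail) and interleaves them, instead of A's single stateful loop threading previous_time_off_end; same O(n) cost, alternative decomposition.


-- ===== PORT A =====
-- A: single stateful loop; row[i] ported as getD i "" (Pre_ guarantees length ≥ 2, exact there)
def process_to_on_off (l : List (List String)) : List (List String) :=
  match l with
  | [] => []  -- Python raises StopIteration here; excluded by Pre_
  | first_row :: rest =>
    let previous_time_off_start := first_row.getD 0 ""
    let previous_time_off_end := first_row.getD 1 ""
    let output_list := [[previous_time_off_start, previous_time_off_end, "off"]]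
    (rest.foldl
      (fun (st : List (List String) × String) row =>
        let current_time_off_start := row.getD 0 ""
        let current_time_off_end := row.getD 1 ""
        (st.1 ++ [[st.2, current_time_off_start, "on"],
                  [current_time_off_start, current_time_off_end, "off"]],
         current_time_off_end))
      (output_list, previous_time_off_end)).1

-- ===== PORT B =====
-- B: two comprehension passes (offs; ons via zip with the tail), then interleave
def process_to_on_off_alt (l : List (List String)) : List (List String) :=
  let offs := l.map (fun r => [r.getD 0 "", r.getD 1 "", "off"])
  let ons := (l.zip l.tail).map (fun p => [p.1.getD 1 "", p.2.getD 0 "", "on"])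
  match offs with
  | [] => []  -- Python B raises IndexError here; excluded by Pre_
  | o0 :: offsRest => o0 :: (ons.zip offsRest).flatMap (fun p => [p.1, p.2])

-- ===== PRECONDITION & SPEC =====
-- Pre_ excludes the empty list (A raises StopIteration) and rows shorter than 2 (A raises IndexError).
def Pre_process_to_on_off (l : List (List String)) : Prop :=
  l ≠ [] ∧ ∀ r ∈ l, 2 ≤ r.length
instance (l : List (List String)) : Decidable (Pre_process_to_on_off l) := by
  unfold Pre_process_to_on_off; infer_instance
def pvWitness_process_to_on_off : List (List String) := [["1", "2"], ["3", "4"]]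
def Spec_process_to_on_off (l : List (List String)) (out : List (List String)) : Prop := out = process_to_on_off_alt l
instance (l : List (List String)) (out : List (List String)) : Decidable (Spec_process_to_on_off l out) := by unfold Spec_process_to_on_off; infer_instance

-- ===== CLAIM (what is proved, stated in full; the proofs are below) =====
def Claim_equal_process_to_on_off : Prop := ∀ (l : List (List String)), Dom_process_to_on_off l → Pre_process_to_on_off l → Spec_process_to_on_off l (process_to_on_off l)

-- ===== LEMMAS AND PROOFS =====

-- the interleaved suffix A's loop produces, as a structural recursion
def pvChain (prev : String) : List (List String) → List (List String)
  | [] => []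
  | r :: rs =>
      [prev, r.getD 0 "", "on"] :: [r.getD 0 "", r.getD 1 "", "off"] :: pvChain (r.getD 1 "") rs

theorem pvFoldl_eq_chain (rest acc : List (List String)) (prev : String) :
    (rest.foldl
      (fun (st : List (List String) × String) row =>
        (st.1 ++ [[st.2, row.getD 0 "", "on"], [row.getD 0 "", row.getD 1 "", "off"]],
         row.getD 1 ""))
      (acc, prev)).1 = acc ++ pvChain prev rest := by
  induction rest generalizing acc prev with
  | nil => simp [pvChain]
  | cons r rs ih => rw [List.foldl_cons, ih, pvChain]; simp

theorem pvChain_eq_interleave (rest : List (List String)) (prevRow : List String) :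
    pvChain (prevRow.getD 1 "") rest =
      ((((prevRow :: rest).zip rest).map
          (fun p => [p.1.getD 1 "", p.2.getD 0 "", "on"])).zip
        (rest.map (fun r => [r.getD 0 "", r.getD 1 "", "off"]))).flatMap
        (fun p => [p.1, p.2]) := by
  induction rest generalizing prevRow with
  | nil => simp [pvChain]
  | cons r rs ih => simp [pvChain]; simpa using ih r

-- ===== VERDICT (by name: the statement is the Claim_ definition above) =====
theorem process_to_on_off_spec : Claim_equal_process_to_on_off := by
  intro l _dom hpre
  unfold Spec_process_to_on_off process_to_on_off process_to_on_off_alt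
  match l with
  | [] => exact absurd rfl hpre.1
  | first :: rest =>
    simp only [pvFoldl_eq_chain, List.map_cons, List.tail_cons, List.singleton_append]
    rw [pvChain_eq_interleave rest first]
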